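-- pv_equiv track=rewrite | github.com/alexpdev/cryptogram | utils.py | mapped
-- ===== SOURCE A (Python) =====
-- def mapped(word):
--     """Generate word map"""
--     num,mapp,temps = 0,[],{}
--     for i in word:
--         if i not in temps:
--             mapp.append(num)
--             temps[i] = num
--             num += 1
--         elif i in temps:
--             mapp.append(temps[i])
--     return mapp
-- ===== SOURCE B (Python) =====
-- def mapped(word):
--     """Generate word map"""
--     return [len(set(word[:word.index(c)])) for c in word]
-- ===== Notes on version B (the rewrite author's own statement) =====
-- stated objective: alternative
-- what changed: Drops A's running counter and seen-dict entirely: for each character B counts the distinct characters in the prefix before that character's first occurrence (set of a slice per position), trading A's single stateful pass for stateless per-position prefix scans.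
import Mathlib
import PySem

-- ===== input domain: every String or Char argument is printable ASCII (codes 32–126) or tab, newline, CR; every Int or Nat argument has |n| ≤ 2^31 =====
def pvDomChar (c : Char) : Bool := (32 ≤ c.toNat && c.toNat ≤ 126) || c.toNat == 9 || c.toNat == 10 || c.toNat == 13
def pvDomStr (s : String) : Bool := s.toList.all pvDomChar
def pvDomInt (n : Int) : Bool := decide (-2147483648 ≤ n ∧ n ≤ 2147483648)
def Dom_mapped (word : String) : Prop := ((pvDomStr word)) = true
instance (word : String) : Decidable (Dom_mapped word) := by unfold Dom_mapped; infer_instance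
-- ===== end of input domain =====

-- B drops A's running counter and seen-dict: each character's code is the number of
-- distinct characters in the prefix before its first occurrence; objective: alternative.

-- ===== PORT A =====
-- A's loop: state (num, mapp, temps), one branch per character.
def mappedLoop : List Char → Int → List Int → PySem.Dict Char Int → List Int
  | [], _, mapp, _ => mapp
  | i :: rest, num, mapp, temps =>
    match temps.get? i with
    | none => mappedLoop rest (num + 1) (mapp ++ [num]) (temps.insert i num)
    | some v => mappedLoop rest num (mapp ++ [v]) temps

def mapped (word : String) : List Int :=
  mappedLoop word.toList 0 [] PySem.Dict.empty

-- ===== PORT B =====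
-- [len(set(word[:word.index(c)])) for c in word]; word.index(c) never raises (c ∈ word),
-- so the `.getD 0` default is unreachable; word[:k] with k ≥ 0 is List.take k (exact here).
def mapped_alt (word : String) : List Int :=
  word.toList.map (fun c =>
    ((PySem.Set.ofList (word.toList.take ((PySem.List.index? word.toList c).getD 0))).length : Int))

-- ===== PRECONDITION & SPEC =====
def Spec_mapped (word : String) (out : List Int) : Prop := out = mapped_alt word
instance (word : String) (out : List Int) : Decidable (Spec_mapped word out) := by unfold Spec_mapped; infer_instance

-- ===== CLAIM (what is proved, stated in full; the proofs are below) =====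
def Claim_equal_mapped : Prop := ∀ (word : String), Dom_mapped word → Spec_mapped word (mapped word)

-- ===== LEMMAS AND PROOFS =====

-- the common value: the first-occurrence index of c in a list, as an Int
def idxI (D : List Char) (c : Char) : Int :=
  ((PySem.List.index? D c).map (fun k => (k : Int))).getD 0

-- Set.add/foldl facts about dedup
lemma foldl_add_extends (l : List Char) : ∀ s : List Char, ∃ t, l.foldl PySem.Set.add s = s ++ t := by
  induction l with
  | nil => exact fun s => ⟨[], by simp⟩
  | cons x xs ih =>
    intro s
    simp only [List.foldl_cons, PySem.Set.add]
    by_cases h : PySem.Set.contains s x = true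
    · rw [if_pos h]; exact ih s
    · rw [if_neg h]
      obtain ⟨t, ht⟩ := ih (s ++ [x])
      exact ⟨x :: t, by simp [ht]⟩

lemma foldl_add_nodup (l : List Char) : ∀ s : List Char, (s ++ l).Nodup → l.foldl PySem.Set.add s = s ++ l := by
  induction l with
  | nil => simp
  | cons x xs ih =>
    intro s hnd
    have hx : x ∉ s := by
      intro hmem
      exact (List.disjoint_of_nodup_append hnd) hmem (by simp)
    simp only [List.foldl_cons, PySem.Set.add]
    rw [if_neg (by simpa [PySem.Set.contains] using hx)]
    have := ih (s ++ [x]) (by simpa [List.append_assoc] using hnd)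
    simpa [List.append_assoc] using this

lemma dedup_append (seen l : List Char) (h : seen.Nodup) :
    ∃ t, PySem.List.dedup (seen ++ l) = seen ++ t ∧
         PySem.List.dedup (seen ++ l) = l.foldl PySem.Set.add seen := by
  have hbase : List.foldl PySem.Set.add ([] : List Char) seen = seen := by
    have := foldl_add_nodup seen ([] : List Char) (by simpa using h)
    simpa using this
  have hsplit : PySem.List.dedup (seen ++ l) = l.foldl PySem.Set.add seen := by
    simp [PySem.List.dedup, PySem.Set.ofList, PySem.Set.empty, List.foldl_append, hbase]
  obtain ⟨t, ht⟩ := foldl_add_extends l seen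
  exact ⟨t, by rw [hsplit, ht], hsplit⟩

-- seen members keep their index in dedup (seen ++ l)
lemma idxI_dedup_of_mem (seen l : List Char) (h : seen.Nodup) {c : Char} (hc : c ∈ seen) :
    idxI (PySem.List.dedup (seen ++ l)) c = idxI seen c := by
  obtain ⟨t, ht, -⟩ := dedup_append seen l h
  rw [ht, idxI, idxI, PySem.List.index?_append_of_mem t hc]

-- dropping an already-seen head does not change dedup
lemma dedup_drop_seen (seen rest : List Char) (h : seen.Nodup) {i : Char} (hi : i ∈ seen) :
    PySem.List.dedup (seen ++ i :: rest) = PySem.List.dedup (seen ++ rest) := by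
  obtain ⟨-, -, h1⟩ := dedup_append seen (i :: rest) h
  obtain ⟨-, -, h2⟩ := dedup_append seen rest h
  rw [h1, h2, List.foldl_cons, PySem.Set.add, if_pos (by simpa using hi)]

-- A-side loop invariant
lemma mappedLoop_spec (l : List Char) : ∀ (seen : List Char) (mapp : List Int) (temps : PySem.Dict Char Int),
    seen.Nodup →
    (∀ c, temps.get? c = (PySem.List.index? seen c).map (fun k => (k : Int))) →
    mappedLoop l (seen.length : Int) mapp temps
      = mapp ++ l.map (fun c => idxI (PySem.List.dedup (seen ++ l)) c) := by
  induction l with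
  | nil => intro seen mapp temps _ _; simp [mappedLoop]
  | cons i rest ih =>
    intro seen mapp temps hnd htemps
    by_cases hmem : i ∈ seen
    · -- seen branch of A
      obtain ⟨k, hk⟩ : ∃ k, PySem.List.index? seen i = some k := by
        cases h : PySem.List.index? seen i with
        | none => exact absurd ((PySem.List.index?_eq_none_iff seen i).mp h) (by simpa using hmem)
        | some k => exact ⟨k, rfl⟩
      have hget : temps.get? i = some (k : Int) := by rw [htemps, hk]; rfl
      have hdd := dedup_drop_seen seen rest hnd hmem
      simp only [mappedLoop, hget]
      rw [ih seen (mapp ++ [(k : Int)]) temps hnd htemps]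
      have hhead : idxI (PySem.List.dedup (seen ++ i :: rest)) i = (k : Int) := by
        rw [idxI_dedup_of_mem seen (i :: rest) hnd hmem, idxI, hk]; rfl
      rw [List.map_cons, hhead, hdd, List.append_assoc]
      rfl
    · -- new-character branch of A
      have hget : temps.get? i = none := by
        rw [htemps, (PySem.List.index?_eq_none_iff seen i).mpr hmem]; rfl
      have hnd' : (seen ++ [i]).Nodup := by
        simp only [List.nodup_append, hnd, List.nodup_singleton, true_and]
        intro a ha b hb
        rw [List.eq_of_mem_singleton hb]
        intro h
        exact hmem (h ▸ ha)
      have htemps' : ∀ c, (temps.insert i (seen.length : Int)).get? c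
          = (PySem.List.index? (seen ++ [i]) c).map (fun k => (k : Int)) := by
        intro c
        by_cases hc : c = i
        · rw [hc, PySem.Dict.get?_insert_self, PySem.List.index?_append_singleton_self seen i hmem]
          rfl
        · rw [PySem.Dict.get?_insert_of_ne _ _ hc, htemps]
          by_cases hcs : c ∈ seen
          · rw [PySem.List.index?_append_of_mem [i] hcs]
          · rw [(PySem.List.index?_eq_none_iff seen c).mpr hcs,
                (PySem.List.index?_eq_none_iff (seen ++ [i]) c).mpr (by simp [hcs]; exact hc)]
      have hassoc : seen ++ i :: rest = (seen ++ [i]) ++ rest := by simp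
      simp only [mappedLoop, hget]
      have hlen : (seen.length : Int) + 1 = ((seen ++ [i]).length : Int) := by
        simp only [List.length_append, List.length_singleton]
        push_cast
        ring
      rw [hlen, ih (seen ++ [i]) (mapp ++ [(seen.length : Int)]) _ hnd' htemps']
      have hhead : idxI (PySem.List.dedup (seen ++ i :: rest)) i = (seen.length : Int) := by
        rw [hassoc]
        rw [idxI_dedup_of_mem (seen ++ [i]) rest hnd' (by simp), idxI,
            PySem.List.index?_append_singleton_self seen i hmem]
        rfl
      rw [List.map_cons, hhead, hassoc, List.append_assoc]
      rfl

-- B-side: the distinct-count of the prefix before c's first occurrence is c's index in dedup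
lemma alt_eq (l : List Char) {c : Char} (hc : c ∈ l) :
    ((PySem.Set.ofList (l.take ((PySem.List.index? l c).getD 0))).length : Int)
      = idxI (PySem.List.dedup l) c := by
  obtain ⟨k, hk⟩ : ∃ k, PySem.List.index? l c = some k := by
    cases h : PySem.List.index? l c with
    | none => exact absurd ((PySem.List.index?_eq_none_iff l c).mp h) (by simpa using hc)
    | some k => exact ⟨k, rfl⟩
  obtain ⟨pre, suf, hl, hlen, hnotin⟩ := ((PySem.List.index?_eq_some_iff l c k).mp hk)
  have htake : l.take ((PySem.List.index? l c).getD 0) = pre := by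
    rw [hk]
    subst hl hlen
    simp
  -- the dedup of l starts with (Set.ofList pre) ++ [c]
  have hSnd : (PySem.Set.ofList pre).Nodup := PySem.Set.nodup_ofList pre
  have hcS : c ∉ PySem.Set.ofList pre := fun h => hnotin ((PySem.Set.mem_ofList pre c).mp h)
  have hdd : ∃ t, PySem.List.dedup l = (PySem.Set.ofList pre ++ [c]) ++ t := by
    have h1 : PySem.List.dedup l = (c :: suf).foldl PySem.Set.add (PySem.Set.ofList pre) := by
      rw [hl]
      simp [PySem.List.dedup, PySem.Set.ofList, PySem.Set.empty, List.foldl_append]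
    have h2 : (c :: suf).foldl PySem.Set.add (PySem.Set.ofList pre)
        = suf.foldl PySem.Set.add (PySem.Set.ofList pre ++ [c]) := by
      simp only [List.foldl_cons, PySem.Set.add]
      rw [if_neg (by simpa [PySem.Set.contains] using hcS)]
    obtain ⟨t, ht⟩ := foldl_add_extends suf (PySem.Set.ofList pre ++ [c])
    exact ⟨t, by rw [h1, h2, ht]⟩
  obtain ⟨t, ht⟩ := hdd
  rw [htake, idxI, ht, PySem.List.index?_append_of_mem t (by simp),
      PySem.List.index?_append_singleton_self _ c hcS]
  rfl

-- ===== VERDICT (by name: the statement is the Claim_ definition above) =====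
theorem mapped_spec : Claim_equal_mapped := by
  intro word _
  unfold Spec_mapped mapped mapped_alt
  have h := mappedLoop_spec word.toList [] [] PySem.Dict.empty (by simp)
    (fun c => by simp [PySem.Dict.get?, PySem.Dict.empty, PySem.List.index?])
  simp only [List.length_nil, Nat.cast_zero, List.nil_append] at h
  rw [h]
  exact (List.map_congr_left (fun c hc => (alt_eq word.toList hc).symm))
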